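-- pv_equiv track=rewrite | github.com/cubic461/Noodle-Core | noodle-core/src/noodlecore/improve/diff.py | validate_diff
-- ===== SOURCE A (Python) =====
-- from typing import Dict, List, Tuple
--
-- def validate_diff(diff: str) -> Tuple[bool, List[str]]:
--     """Validate a diff format.
--
--     Args:
--         diff: Diff string to validate
--
--     Returns:
--         Tuple of (is_valid, list_of_errors)
--     """
--     errors = []
--
--     if not diff or not diff.strip():
--         return True, errors
--
--     lines = diff.split('\n')
--     has_file_header = False
--     has_hunk = False
--
--     for i, line in enumerate(lines):
--         if line.startswith('--- ') or line.startswith('+++ '):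
--             has_file_header = True
--         elif line.startswith('@@'):
--             has_hunk = True
--         elif line.startswith('+') and not line.startswith('+++'):
--             pass  # Valid addition line
--         elif line.startswith('-') and not line.startswith('---'):
--             pass  # Valid removal line
--         elif line.startswith(' '):
--             pass  # Valid context line
--         elif line.startswith('diff '):
--             pass  # Valid diff command
--         elif line.startswith('index ') or line.startswith('new file ') or line.startswith('deleted file '):
--             pass  # Valid git metadata
--         elif not line.strip():
--             pass  # Empty line is fine
--         else:
--             errors.append(f"Line {i + 1}: Invalid diff syntax: {line[:50]}")
--
--     if not has_file_header:
--         errors.append("No file header found (expected ---/+++ lines)")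
--
--     if not has_hunk:
--         errors.append("No hunk headers found (expected @@ lines)")
--
--     return len(errors) == 0, errors
-- ===== SOURCE B (Python) =====
-- from typing import Dict, List, Tuple
--
-- _VALID_PREFIXES = ('--- ', '+++ ', '@@', 'diff ', 'index ', 'new file ', 'deleted file ')
--
-- def _valid_line(line: str) -> bool:
--     """A line that the diff grammar accepts (no error reported for it)."""
--     if not line.strip():
--         return True
--     if any(line.startswith(p) for p in _VALID_PREFIXES):
--         return True
--     if line.startswith('+') and not line.startswith('+++'):
--         return True
--     if line.startswith('-') and not line.startswith('---'):
--         return True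
--     return line.startswith(' ')
--
-- def validate_diff(diff: str) -> Tuple[bool, List[str]]:
--     if not diff or not diff.strip():
--         return True, []
--     lines = diff.split('\n')
--     has_file_header = any(l.startswith('--- ') or l.startswith('+++ ') for l in lines)
--     has_hunk = any(l.startswith('@@') for l in lines)
--     errors = [f"Line {i + 1}: Invalid diff syntax: {line[:50]}"
--               for i, line in enumerate(lines) if not _valid_line(line)]
--     if not has_file_header:
--         errors.append("No file header found (expected ---/+++ lines)")
--     if not has_hunk:
--         errors.append("No hunk headers found (expected @@ lines)")
--     return len(errors) == 0, errors
-- ===== Notes on version B (the rewrite author's own statement) =====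
-- stated objective: alternative
-- what changed: Replaces A's single stateful loop (two flags plus an error accumulator threaded through an 8-branch elif chain) by three independent passes: two any() scans for the header/hunk flags and a comprehension over a standalone line-validity predicate.
import Mathlib
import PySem

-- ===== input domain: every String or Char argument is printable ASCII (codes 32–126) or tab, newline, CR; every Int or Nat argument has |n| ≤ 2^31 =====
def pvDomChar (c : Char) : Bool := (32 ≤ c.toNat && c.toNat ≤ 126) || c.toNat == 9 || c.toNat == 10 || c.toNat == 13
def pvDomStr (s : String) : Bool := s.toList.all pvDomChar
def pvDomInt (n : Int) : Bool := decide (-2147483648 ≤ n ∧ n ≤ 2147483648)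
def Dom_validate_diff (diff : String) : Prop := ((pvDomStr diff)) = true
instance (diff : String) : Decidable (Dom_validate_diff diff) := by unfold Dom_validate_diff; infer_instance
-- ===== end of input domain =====

-- B replaces A's single stateful loop (two flags + error list threaded through an elif chain)
-- by three independent passes over the lines: two any-scans for the flags and a filter over a
-- standalone line-validity predicate; same return value (alternative decomposition, not faster).


-- shared input parsing: diff.split('\n'), as lists of code points
def pvLines (diff : String) : List (List Char) :=
  PySem.Chars.splitOn diff.toList "\n".toList

-- f"Line {i+1}: Invalid diff syntax: {line[:50]}"
def pvMsg (i : Int) (line : List Char) : String :=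
  "Line " ++ PySem.Int.toStr (i + 1) ++ ": Invalid diff syntax: "
    ++ String.ofList (PySem.Chars.slice line none (some 50))

-- ===== PORT A =====
-- the body of A's for-loop: state = (has_file_header, has_hunk, errors)
def pvStepA (st : Bool × Bool × List String) (p : Int × List Char) : Bool × Bool × List String :=
  let line := p.2
  if PySem.Chars.startswith line "--- ".toList || PySem.Chars.startswith line "+++ ".toList then
    (true, st.2.1, st.2.2)
  else if PySem.Chars.startswith line "@@".toList then
    (st.1, true, st.2.2)
  else if PySem.Chars.startswith line "+".toList && !PySem.Chars.startswith line "+++".toList then st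
  else if PySem.Chars.startswith line "-".toList && !PySem.Chars.startswith line "---".toList then st
  else if PySem.Chars.startswith line " ".toList then st
  else if PySem.Chars.startswith line "diff ".toList then st
  else if PySem.Chars.startswith line "index ".toList || PySem.Chars.startswith line "new file ".toList
          || PySem.Chars.startswith line "deleted file ".toList then st
  else if PySem.Chars.strip line = [] then st
  else (st.1, st.2.1, st.2.2 ++ [pvMsg p.1 line])

def validate_diff (diff : String) : Bool × List String :=
  if diff = "" || PySem.Str.strip diff = "" then (true, [])
  else
    let res := (PySem.List.enumerate (pvLines diff) 0).foldl pvStepA (false, false, [])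
    let errors1 := if !res.1 then res.2.2 ++ ["No file header found (expected ---/+++ lines)"] else res.2.2
    let errors2 := if !res.2.1 then errors1 ++ ["No hunk headers found (expected @@ lines)"] else errors1
    (errors2.length == 0, errors2)

-- ===== PORT B =====
def pvIsHeader (l : List Char) : Bool :=
  PySem.Chars.startswith l "--- ".toList || PySem.Chars.startswith l "+++ ".toList

def pvValidLine (line : List Char) : Bool :=
  PySem.Chars.strip line = []
  || PySem.Chars.startswith line "--- ".toList || PySem.Chars.startswith line "+++ ".toList
  || PySem.Chars.startswith line "@@".toList || PySem.Chars.startswith line "diff ".toList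
  || PySem.Chars.startswith line "index ".toList || PySem.Chars.startswith line "new file ".toList
  || PySem.Chars.startswith line "deleted file ".toList
  || (PySem.Chars.startswith line "+".toList && !PySem.Chars.startswith line "+++".toList)
  || (PySem.Chars.startswith line "-".toList && !PySem.Chars.startswith line "---".toList)
  || PySem.Chars.startswith line " ".toList

def validate_diff_alt (diff : String) : Bool × List String :=
  if diff = "" || PySem.Str.strip diff = "" then (true, [])
  else
    let lines := pvLines diff
    let hasFileHeader := lines.any pvIsHeader
    let hasHunk := lines.any (fun l => PySem.Chars.startswith l "@@".toList)
    let errors0 := (PySem.List.enumerate lines 0).filterMap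
      (fun p => if pvValidLine p.2 then none else some (pvMsg p.1 p.2))
    let errors1 := if !hasFileHeader then errors0 ++ ["No file header found (expected ---/+++ lines)"] else errors0
    let errors2 := if !hasHunk then errors1 ++ ["No hunk headers found (expected @@ lines)"] else errors1
    (errors2.length == 0, errors2)

-- ===== PRECONDITION & SPEC =====
def Spec_validate_diff (diff : String) (out : Bool × List String) : Prop := out = validate_diff_alt diff
instance (diff : String) (out : Bool × List String) : Decidable (Spec_validate_diff diff out) := by unfold Spec_validate_diff; infer_instance

-- ===== CLAIM (what is proved, stated in full; the proofs are below) =====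
def Claim_equal_validate_diff : Prop := ∀ (diff : String), Dom_validate_diff diff → Spec_validate_diff diff (validate_diff diff)

-- ===== LEMMAS AND PROOFS =====

-- a line starting with '--- ' or '+++ ' cannot start with '@@'
theorem not_hunk_of_header (l : List Char) (h : pvIsHeader l = true) :
    PySem.Chars.startswith l "@@".toList = false := by
  rw [Bool.eq_false_iff]
  intro hq
  rw [PySem.Chars.startswith_iff] at hq
  simp only [pvIsHeader, Bool.or_eq_true, PySem.Chars.startswith_iff] at h
  obtain h | h := h <;> obtain ⟨t, rfl⟩ := h <;> simp [List.cons_prefix_cons] at hq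

set_option maxHeartbeats 1000000 in
theorem step_eq (st : Bool × Bool × List String) (p : Int × List Char) :
    pvStepA st p = (st.1 || pvIsHeader p.2,
                    st.2.1 || PySem.Chars.startswith p.2 "@@".toList,
                    st.2.2 ++ if pvValidLine p.2 then [] else [pvMsg p.1 p.2]) := by
  simp only [pvIsHeader]
  unfold pvStepA
  cases hv : pvValidLine p.2
  case true =>
    rw [if_pos rfl, List.append_nil]
    dsimp only
    split_ifs with h1 h2 h3 h4 h5 h6 h7 h8
    · -- file-header line
      have hq := not_hunk_of_header p.2 (by simpa [pvIsHeader] using h1)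
      refine Prod.ext ?_ (Prod.ext ?_ ?_)
      · rw [h1, Bool.or_true]
      · rw [hq, Bool.or_false]
      · rfl
    · -- hunk line
      simp only [Bool.not_eq_true] at h1
      refine Prod.ext ?_ (Prod.ext ?_ ?_)
      · rw [h1, Bool.or_false]
      · rw [h2, Bool.or_true]
      · rfl
    · -- pass branch
      simp only [Bool.not_eq_true] at h1 h2
      refine Prod.ext ?_ (Prod.ext ?_ ?_)
      · rw [h1, Bool.or_false]
      · rw [h2, Bool.or_false]
      · rfl
    · -- pass branch
      simp only [Bool.not_eq_true] at h1 h2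
      refine Prod.ext ?_ (Prod.ext ?_ ?_)
      · rw [h1, Bool.or_false]
      · rw [h2, Bool.or_false]
      · rfl
    · -- pass branch
      simp only [Bool.not_eq_true] at h1 h2
      refine Prod.ext ?_ (Prod.ext ?_ ?_)
      · rw [h1, Bool.or_false]
      · rw [h2, Bool.or_false]
      · rfl
    · -- pass branch
      simp only [Bool.not_eq_true] at h1 h2
      refine Prod.ext ?_ (Prod.ext ?_ ?_)
      · rw [h1, Bool.or_false]
      · rw [h2, Bool.or_false]
      · rfl
    · -- pass branch
      simp only [Bool.not_eq_true] at h1 h2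
      refine Prod.ext ?_ (Prod.ext ?_ ?_)
      · rw [h1, Bool.or_false]
      · rw [h2, Bool.or_false]
      · rfl
    · -- pass branch
      simp only [Bool.not_eq_true] at h1 h2
      refine Prod.ext ?_ (Prod.ext ?_ ?_)
      · rw [h1, Bool.or_false]
      · rw [h2, Bool.or_false]
      · rfl
    · -- error branch: contradicts hv = true
      simp only [Bool.not_eq_true] at h1 h2 h5 h6 h7
      simp only [Bool.or_eq_false_iff] at h1 h7
      simp only [Bool.and_eq_true, Bool.not_eq_true'] at h3 h4
      simp only [pvValidLine, Bool.or_eq_true, Bool.and_eq_true, Bool.not_eq_true', decide_eq_true_eq] at hv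
      simp only [h1.1, h1.2, h2, h5, h6, h7.1.1, h7.1.2, h7.2, Bool.false_eq_true, or_false] at hv
      tauto
  case false =>
    simp only [Bool.false_eq_true, if_false]
    split_ifs with h1 h2 h3 h4 h5 h6 h7 h8
    · -- valid branch 1 contradicts hv = false
      have hvt : pvValidLine p.2 = true := by
        try simp only [Bool.or_eq_true, Bool.and_eq_true, Bool.not_eq_true'] at h1
        simp only [pvValidLine, Bool.or_eq_true, Bool.and_eq_true, Bool.not_eq_true', decide_eq_true_eq]
        tauto
      simp [hvt] at hv
    · -- valid branch 2 contradicts hv = false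
      have hvt : pvValidLine p.2 = true := by
        try simp only [Bool.or_eq_true, Bool.and_eq_true, Bool.not_eq_true'] at h2
        simp only [pvValidLine, Bool.or_eq_true, Bool.and_eq_true, Bool.not_eq_true', decide_eq_true_eq]
        tauto
      simp [hvt] at hv
    · -- valid branch 3 contradicts hv = false
      have hvt : pvValidLine p.2 = true := by
        try simp only [Bool.or_eq_true, Bool.and_eq_true, Bool.not_eq_true'] at h3
        simp only [pvValidLine, Bool.or_eq_true, Bool.and_eq_true, Bool.not_eq_true', decide_eq_true_eq]
        tauto
      simp [hvt] at hv
    · -- valid branch 4 contradicts hv = false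
      have hvt : pvValidLine p.2 = true := by
        try simp only [Bool.or_eq_true, Bool.and_eq_true, Bool.not_eq_true'] at h4
        simp only [pvValidLine, Bool.or_eq_true, Bool.and_eq_true, Bool.not_eq_true', decide_eq_true_eq]
        tauto
      simp [hvt] at hv
    · -- valid branch 5 contradicts hv = false
      have hvt : pvValidLine p.2 = true := by
        try simp only [Bool.or_eq_true, Bool.and_eq_true, Bool.not_eq_true'] at h5
        simp only [pvValidLine, Bool.or_eq_true, Bool.and_eq_true, Bool.not_eq_true', decide_eq_true_eq]
        tauto
      simp [hvt] at hv
    · -- valid branch 6 contradicts hv = false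
      have hvt : pvValidLine p.2 = true := by
        try simp only [Bool.or_eq_true, Bool.and_eq_true, Bool.not_eq_true'] at h6
        simp only [pvValidLine, Bool.or_eq_true, Bool.and_eq_true, Bool.not_eq_true', decide_eq_true_eq]
        tauto
      simp [hvt] at hv
    · -- valid branch 7 contradicts hv = false
      have hvt : pvValidLine p.2 = true := by
        try simp only [Bool.or_eq_true, Bool.and_eq_true, Bool.not_eq_true'] at h7
        simp only [pvValidLine, Bool.or_eq_true, Bool.and_eq_true, Bool.not_eq_true', decide_eq_true_eq]
        tauto
      simp [hvt] at hv
    · -- valid branch 8 contradicts hv = false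
      have hvt : pvValidLine p.2 = true := by
        try simp only [Bool.or_eq_true, Bool.and_eq_true, Bool.not_eq_true'] at h8
        simp only [pvValidLine, Bool.or_eq_true, Bool.and_eq_true, Bool.not_eq_true', decide_eq_true_eq]
        tauto
      simp [hvt] at hv
    · -- error line: both sides append the message
      simp only [Bool.not_eq_true] at h1 h2
      refine Prod.ext ?_ (Prod.ext ?_ ?_)
      · rw [h1, Bool.or_false]
      · rw [h2, Bool.or_false]
      · rfl

theorem foldA_eq (lines : List (List Char)) : ∀ (i : Int) (hf hh : Bool) (errs : List String),
    (PySem.List.enumerate lines i).foldl pvStepA (hf, hh, errs)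
      = (hf || lines.any pvIsHeader,
         hh || lines.any (fun l => PySem.Chars.startswith l "@@".toList),
         errs ++ (PySem.List.enumerate lines i).filterMap
           (fun p => if pvValidLine p.2 then none else some (pvMsg p.1 p.2))) := by
  induction lines with
  | nil => intro i hf hh errs; simp [PySem.List.enumerate_nil]
  | cons l rest ih =>
    intro i hf hh errs
    rw [PySem.List.enumerate_cons, List.foldl_cons, step_eq, ih]
    by_cases hvl : pvValidLine l = true
    · simp [hvl, Bool.or_assoc]
    · simp only [Bool.not_eq_true] at hvl
      simp [hvl, Bool.or_assoc]

-- ===== VERDICT (by name: the statement is the Claim_ definition above) =====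
theorem validate_diff_spec : Claim_equal_validate_diff := by
  intro diff _
  unfold Spec_validate_diff validate_diff validate_diff_alt
  split_ifs with h
  · rfl
  · simp [foldA_eq]
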